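-- pv_equiv track=rewrite | github.com/jakerslam/pqts | tools/close_srs_gaps_in_todo.py | build_section_lines
-- ===== SOURCE A (Python) =====
-- from collections import defaultdict
--
-- SECTION_HEADER = "## 02l. Full SRS Assimilation Closure (2026-03-10)"
--
-- def sort_req_id(req_id: str) -> tuple[str, int]:
--     prefix, suffix = req_id.split("-", 1)
--     return prefix, int(suffix)
--
-- def build_section_lines(rows: list[dict[str, object]]) -> list[str]:
--     grouped: dict[str, list[str]] = defaultdict(list)
--     for row in rows:
--         status = str(row.get("status", ""))
--         req_id = str(row.get("id", ""))
--         if status != "unmapped" or not req_id: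
--             continue
--         prefix = req_id.split("-", 1)[0]
--         grouped[prefix].append(req_id)
--
--     lines: list[str] = [SECTION_HEADER, ""]
--     if not grouped:
--         lines.append("- [x] No unmapped SRS items remaining after assimilation closure.")
--         lines.append("")
--         return lines
--
--     for prefix in sorted(grouped):
--         req_ids = sorted(grouped[prefix], key=sort_req_id)
--         refs = ", ".join(req_ids)
--         lines.append(
--             "- [x] Assimilate "
--             f"{prefix} requirement family into baseline contracts, policy hooks, and evidence tracking "
--             f"(`ROI: high`, `Type: engineering`, `Track: parity`, `Ref: {refs}`)"
--         )
--     lines.append("")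
--     return lines
-- ===== SOURCE B (Python) =====
-- SECTION_HEADER = "## 02l. Full SRS Assimilation Closure (2026-03-10)"
--
--
-- def _req_key(req_id):
--     prefix, suffix = req_id.split("-", 1)
--     return prefix, int(suffix)
--
--
-- def _family_line(prefix, req_ids):
--     refs = ", ".join(req_ids)
--     return (
--         "- [x] Assimilate "
--         f"{prefix} requirement family into baseline contracts, policy hooks, and evidence tracking "
--         f"(`ROI: high`, `Type: engineering`, `Track: parity`, `Ref: {refs}`)"
--     )
--
--
-- def build_section_lines(rows):
--     unmapped = [str(r.get("id", "")) for r in rows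
--                 if str(r.get("status", "")) == "unmapped" and str(r.get("id", ""))]
--     ordered = sorted(unmapped, key=_req_key)
--     lines = [SECTION_HEADER, ""]
--     if not ordered:
--         lines.append("- [x] No unmapped SRS items remaining after assimilation closure.")
--     else:
--         run_prefix = ""
--         run = []
--         for req_id in ordered:
--             prefix = req_id.split("-", 1)[0]
--             if run and prefix != run_prefix:
--                 lines.append(_family_line(run_prefix, run))
--                 run = []
--             run_prefix = prefix
--             run.append(req_id)
--         lines.append(_family_line(run_prefix, run))
--     lines.append("")
--     return lines
-- ===== Notes on version B (the rewrite author's own statement) =====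
-- stated objective: alternative
-- what changed: B replaces A's defaultdict grouping with per-prefix tuple-key sorts by one global sort of the flat unmapped-id list on the (prefix, int(suffix)) key followed by a single run-grouping pass that emits one markdown line per prefix run.
import Mathlib
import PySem

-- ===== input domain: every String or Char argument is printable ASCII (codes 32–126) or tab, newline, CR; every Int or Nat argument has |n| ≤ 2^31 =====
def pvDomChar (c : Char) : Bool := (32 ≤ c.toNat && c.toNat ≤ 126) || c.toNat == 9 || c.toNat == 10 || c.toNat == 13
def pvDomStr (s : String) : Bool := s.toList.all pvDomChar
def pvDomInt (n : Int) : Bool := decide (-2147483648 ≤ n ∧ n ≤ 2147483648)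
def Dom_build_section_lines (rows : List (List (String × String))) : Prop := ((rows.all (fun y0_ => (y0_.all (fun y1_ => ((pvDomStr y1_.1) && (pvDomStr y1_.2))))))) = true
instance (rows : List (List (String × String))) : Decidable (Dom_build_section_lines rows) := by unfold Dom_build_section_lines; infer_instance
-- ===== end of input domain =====

-- B replaces A's defaultdict grouping + per-family sorts by one global sort on the
-- (prefix, int(suffix)) key followed by a single run-grouping pass (objective: alternative).
-- Pre_ excludes only inputs on which A raises (an unmapped id without '-' or with a non-int suffix).

-- shared ports of 'row.get(k, "")', 'req_id.split("-", 1)[0]' and of the int sort component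
def pvRowStatus (row : List (String × String)) : String := (PySem.Dict.mk row).getD "status" ""
def pvRowId (row : List (String × String)) : String := (PySem.Dict.mk row).getD "id" ""
def pvPrefixOf (rid : String) : String := ((PySem.Str.splitMax? rid "-" 1).getD []).headD ""
-- int(suffix); `.getD 0` is dead under Pre_ (the split has two parts and the int parses there)
def pvSuffixKey (rid : String) : Int :=
  (PySem.Int.ofStr? (((PySem.Str.splitMax? rid "-" 1).getD []).getD 1 "")).getD 0

def pvHeader : String := "## 02l. Full SRS Assimilation Closure (2026-03-10)"
def pvNoGap : String := "- [x] No unmapped SRS items remaining after assimilation closure."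

-- ===== PORT A =====
def build_section_lines (rows : List (List (String × String))) : List String :=
  let grouped : PySem.Dict String (List String) :=
    rows.foldl (fun d row =>
      if pvRowStatus row ≠ "unmapped" ∨ pvRowId row = "" then d
      else d.modify (pvPrefixOf (pvRowId row)) [] (fun g => g ++ [pvRowId row])) PySem.Dict.empty
  let lines : List String := [pvHeader, ""]
  if grouped.items.isEmpty then
    lines ++ [pvNoGap, ""]
  else
    let lines := (PySem.List.sorted grouped.keys (fun k => k) false).foldl
      (fun acc p =>
        let req_ids := PySem.List.sorted2 (grouped.getD p []) pvPrefixOf pvSuffixKey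
        let refs := PySem.Str.join ", " req_ids
        acc ++ ["- [x] Assimilate " ++ p ++ " requirement family into baseline contracts, policy hooks, and evidence tracking (`ROI: high`, `Type: engineering`, `Track: parity`, `Ref: " ++ refs ++ "`)"]) lines
    lines ++ [""]

-- ===== PORT B =====
def pvFamilyLine (p : String) (req_ids : List String) : String :=
  let refs := PySem.Str.join ", " req_ids
  "- [x] Assimilate " ++ p ++ " requirement family into baseline contracts, policy hooks, and evidence tracking (`ROI: high`, `Type: engineering`, `Track: parity`, `Ref: " ++ refs ++ "`)"

def build_section_lines_alt (rows : List (List (String × String))) : List String :=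
  let unmapped : List String :=
    (rows.filter (fun r => pvRowStatus r == "unmapped" && !(pvRowId r == ""))).map pvRowId
  let ordered := PySem.List.sorted2 unmapped pvPrefixOf pvSuffixKey
  let lines : List String := [pvHeader, ""]
  let lines :=
    if ordered.isEmpty then lines ++ [pvNoGap]
    else
      let st := ordered.foldl
        (fun (s : List String × String × List String) req_id =>
          let p := pvPrefixOf req_id
          if s.2.2 ≠ [] ∧ p ≠ s.2.1 then (s.1 ++ [pvFamilyLine s.2.1 s.2.2], p, [req_id])
          else (s.1, p, s.2.2 ++ [req_id])) (lines, "", ([] : List String))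
      st.1 ++ [pvFamilyLine st.2.1 st.2.2]
  lines ++ [""]

-- ===== PRECONDITION & SPEC =====
-- Pre_ excludes exactly the inputs on which A raises (ValueError/unpack error in sort_req_id):
-- some collected unmapped id has no "-" or a suffix int() rejects.
def Pre_build_section_lines (rows : List (List (String × String))) : Prop :=
  ∀ row ∈ rows, pvRowStatus row = "unmapped" → pvRowId row ≠ "" →
    (((PySem.Str.splitMax? (pvRowId row) "-" 1).getD []).length = 2 ∧
      (PySem.Int.ofStr? (((PySem.Str.splitMax? (pvRowId row) "-" 1).getD []).getD 1 "")).isSome = true)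
instance (rows : List (List (String × String))) : Decidable (Pre_build_section_lines rows) := by
  unfold Pre_build_section_lines; infer_instance

def pvWitness_build_section_lines : (List (List (String × String))) :=
  [[("status", "unmapped"), ("id", "SRS-3")], [("status", "mapped"), ("id", "SRS-4")]]

def Spec_build_section_lines (rows : List (List (String × String))) (out : List String) : Prop := out = build_section_lines_alt rows
instance (rows : List (List (String × String))) (out : List String) : Decidable (Spec_build_section_lines rows out) := by unfold Spec_build_section_lines; infer_instance

-- ===== CLAIM (what is proved, stated in full; the proofs are below) =====
def Claim_equal_build_section_lines : Prop := ∀ (rows : List (List (String × String))), Dom_build_section_lines rows → Pre_build_section_lines rows → Spec_build_section_lines rows (build_section_lines rows)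

-- ===== LEMMAS AND PROOFS =====

-- the global sort key of B, as one lexicographic key
def pvKey (rid : String) : Lex (String × Int) := toLex (pvPrefixOf rid, pvSuffixKey rid)

-- B's run-grouping loop, as a recursion producing (prefix, family) pairs
def pvRuns (pp : String) (pend : List String) : List String → List (String × List String)
  | [] => if pend.isEmpty then [] else [(pp, pend)]
  | r :: t =>
      if pend ≠ [] ∧ pvPrefixOf r ≠ pp then (pp, pend) :: pvRuns (pvPrefixOf r) [r] t
      else pvRuns (pvPrefixOf r) (pend ++ [r]) t

theorem sorted2_eq_sorted_pvKey (xs : List String) :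
    PySem.List.sorted2 xs pvPrefixOf pvSuffixKey = PySem.List.sorted xs pvKey := by
  show List.foldl _ [] xs = List.foldl _ [] xs
  have hb : (fun a b => decide (pvPrefixOf a < pvPrefixOf b) ||
      (!decide (pvPrefixOf b < pvPrefixOf a) && decide (pvSuffixKey a < pvSuffixKey b))) =
      (fun a b => decide (pvKey a < pvKey b)) := by
    funext a b
    rcases lt_trichotomy (pvPrefixOf a) (pvPrefixOf b) with h | h | h
    · simp [pvKey, Prod.Lex.toLex_lt_toLex, h, not_lt_of_gt h]
    · simp [pvKey, Prod.Lex.toLex_lt_toLex, h]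
    · simp [pvKey, Prod.Lex.toLex_lt_toLex, h, not_lt_of_gt h, ne_of_gt h]
  rw [hb]

theorem insertBy_cons_of_head {α : Type} (bef : α → α → Bool) (x : α) (l : List α)
    (h : ∀ z ∈ l.head?, bef x z = true) :
    PySem.List.insertBy bef x l = x :: l := by
  cases l with
  | nil => rfl
  | cons z t => simp [PySem.List.insertBy, h z rfl]

theorem filter_insertBy {α κ : Type} [LinearOrder κ] (key : α → κ) (q : α → Bool) (x : α)
    (ys : List α) (h : ys.Pairwise (fun a b => key a ≤ key b)) :
    (PySem.List.insertBy (fun a b => decide (key a < key b)) x ys).filter q =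
      if q x then PySem.List.insertBy (fun a b => decide (key a < key b)) x (ys.filter q)
      else ys.filter q := by
  induction ys with
  | nil => cases hq : q x <;> simp [PySem.List.insertBy, hq]
  | cons y t ih =>
    rcases List.pairwise_cons.mp h with ⟨hy, ht⟩
    by_cases hxy : key x < key y
    · -- x goes in front
      cases hq : q x
      · -- ¬ q x : filter drops x
        simp only [PySem.List.insertBy, decide_eq_true_eq, if_pos hxy, List.filter_cons, hq]
        simp
      · cases hqy : q y
        · -- q x, ¬ q y
          have hfront : PySem.List.insertBy (fun a b => decide (key a < key b)) x
              ((y :: t).filter q) = x :: (y :: t).filter q := by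
            apply insertBy_cons_of_head
            intro z hz
            have hz' : z ∈ (y :: t).filter q := List.mem_of_mem_head? hz
            have hzm := List.of_mem_filter hz'
            have hzt : z ∈ y :: t := List.mem_of_mem_filter hz'
            rcases List.mem_cons.mp hzt with rfl | hzt'
            · simp [hqy] at hzm
            · exact decide_eq_true (lt_of_lt_of_le hxy (hy z hzt'))
          simp only [PySem.List.insertBy, decide_eq_true_eq, if_pos hxy, List.filter_cons, hq, hqy,
]
          simp only [List.filter_cons, hqy, cond_false] at hfront
          exact hfront.symm
        · -- q x, q y
          simp only [PySem.List.insertBy, decide_eq_true_eq, if_pos hxy, List.filter_cons, hq, hqy]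
          simp [PySem.List.insertBy, hxy]
    · -- x goes after y
      have step : PySem.List.insertBy (fun a b => decide (key a < key b)) x (y :: t) =
          y :: PySem.List.insertBy (fun a b => decide (key a < key b)) x t := by
        simp [PySem.List.insertBy, hxy]
      rw [step]
      cases hqy : q y
      · simp only [List.filter_cons, hqy]
        rw [ih ht]
        simp
      · simp only [List.filter_cons, hqy]
        rw [ih ht]
        cases hq : q x
        · simp [hq]
        · have : PySem.List.insertBy (fun a b => decide (key a < key b)) x (y :: t.filter q) =
              y :: PySem.List.insertBy (fun a b => decide (key a < key b)) x (t.filter q) := by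
            simp [PySem.List.insertBy, hxy]
          simp [this]

theorem filter_sorted {α κ : Type} [LinearOrder κ] (key : α → κ) (q : α → Bool) (L : List α) :
    (PySem.List.sorted L key).filter q = PySem.List.sorted (L.filter q) key := by
  induction L using List.reverseRecOn with
  | nil => rfl
  | append_singleton L x ih =>
    have hsnoc : ∀ (M : List α), PySem.List.sorted (M ++ [x]) key =
        PySem.List.insertBy (fun a b => decide (key a < key b)) x (PySem.List.sorted M key) := by
      intro M
      rw [PySem.List.sorted_eq_foldl_insertBy, PySem.List.sorted_eq_foldl_insertBy,
        List.foldl_append]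
      rfl
    rw [hsnoc, filter_insertBy key q x _ (PySem.List.sorted_pairwise L key),
      List.filter_append]
    cases hq : q x
    · simp [hq, ih]
    · simp only [hq, if_true, List.filter_cons, List.filter_nil]
      rw [hsnoc, ih]

theorem foldl_add_sublist {α : Type} [BEq α] (l s : List α) :
    (List.foldl PySem.Set.add s l).Sublist (s ++ l) := by
  induction l generalizing s with
  | nil => simp
  | cons x t ih =>
    refine (ih (PySem.Set.add s x)).trans ?_
    have : (PySem.Set.add s x).Sublist (s ++ [x]) := by
      unfold PySem.Set.add
      split
      · exact (List.sublist_append_left s [x])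
      · exact List.Sublist.refl _
    simpa using this.append_right t
theorem dedup_sublist {α : Type} [BEq α] (l : List α) : (PySem.List.dedup l).Sublist l := by
  have := foldl_add_sublist l ([] : List α)
  simpa [PySem.List.dedup, PySem.Set.ofList_eq_foldl] using this

theorem foldl_add_cons_not_mem {α : Type} [BEq α] [LawfulBEq α] (l : List α) (p : α) (s : List α)
    (hp : p ∉ l) : List.foldl PySem.Set.add (p :: s) l = p :: List.foldl PySem.Set.add s l := by
  induction l generalizing s with
  | nil => rfl
  | cons x t ih =>
    have hxp : x ≠ p := fun h => hp (by simp [h])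
    have hstep : PySem.Set.add (p :: s) x = p :: PySem.Set.add s x := by
      unfold PySem.Set.add PySem.Set.contains
      have : (p :: s).contains x = s.contains x := by
        simp [hxp]
      rw [this]
      split <;> simp
    simp only [List.foldl_cons, hstep]
    exact ih _ (fun h => hp (by simp [h]))

theorem foldl_add_const {α : Type} [BEq α] [LawfulBEq α] (xs : List α) (p : α)
    (hxs : ∀ x ∈ xs, x = p) : List.foldl PySem.Set.add [p] xs = [p] := by
  induction xs with
  | nil => rfl
  | cons x t ih =>
    have hx := hxs x (by simp)
    subst hx
    have : PySem.Set.add [x] x = [x] := by simp [PySem.Set.add, PySem.Set.contains]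
    simp only [List.foldl_cons, this]
    exact ih (fun y hy => hxs y (by simp [hy]))

theorem dedup_const_append {α : Type} [BEq α] [LawfulBEq α] (xs ys : List α) (p : α)
    (hxs : ∀ x ∈ xs, x = p) (hne : xs ≠ []) (hys : p ∉ ys) :
    PySem.List.dedup (xs ++ ys) = p :: PySem.List.dedup ys := by
  cases xs with
  | nil => exact absurd rfl hne
  | cons x t =>
    have hx := hxs x (by simp); subst hx
    simp only [PySem.List.dedup, PySem.Set.ofList_eq_foldl, List.cons_append, List.foldl_cons,
      List.foldl_append]
    have h0 : PySem.Set.add ([] : List α) x = [x] := by simp [PySem.Set.add, PySem.Set.contains]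
    rw [h0, foldl_add_const t x (fun y hy => hxs y (by simp [hy]))]
    exact foldl_add_cons_not_mem ys x [] hys


theorem getD_group (l : List String) (d : PySem.Dict String (List String)) (p : String) :
    (l.foldl (fun d x => d.modify (pvPrefixOf x) [] (fun g => g ++ [x])) d).getD p [] =
      d.getD p [] ++ l.filter (fun x => pvPrefixOf x == p) := by
  induction l generalizing d with
  | nil => simp
  | cons x t ih =>
    simp only [List.foldl_cons, List.filter_cons]
    rw [ih]
    have hmod : (d.modify (pvPrefixOf x) [] (fun g => g ++ [x])) =
        d.insert (pvPrefixOf x) (d.getD (pvPrefixOf x) [] ++ [x]) := rfl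
    rw [hmod, PySem.Dict.getD_insert]
    by_cases hp : p = pvPrefixOf x
    · simp [hp]
    · have : (pvPrefixOf x == p) = false := by simpa [beq_iff_eq] using fun h => hp h.symm
      simp [hp, this]

def pvStep (s : List String × String × List String) (req_id : String) :
    List String × String × List String :=
  let p := pvPrefixOf req_id
  if s.2.2 ≠ [] ∧ p ≠ s.2.1 then (s.1 ++ [pvFamilyLine s.2.1 s.2.2], p, [req_id])
  else (s.1, p, s.2.2 ++ [req_id])

theorem foldB_eq_runs (S ls : List String) (pp : String) (pend : List String)
    (hne : pend ≠ [] ∨ S ≠ []) :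
    (S.foldl pvStep (ls, pp, pend)).1 ++
        [pvFamilyLine (S.foldl pvStep (ls, pp, pend)).2.1 (S.foldl pvStep (ls, pp, pend)).2.2] =
      ls ++ (pvRuns pp pend S).map (fun pr => pvFamilyLine pr.1 pr.2) := by
  induction S generalizing ls pp pend with
  | nil =>
    have hp : pend ≠ [] := hne.resolve_right (fun h => h rfl)
    have : pend.isEmpty = false := by simpa [List.isEmpty_iff] using hp
    simp [pvRuns, this]
  | cons r t ih =>
    simp only [List.foldl_cons]
    by_cases hg : pend ≠ [] ∧ pvPrefixOf r ≠ pp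
    · have hstep : pvStep (ls, pp, pend) r =
          (ls ++ [pvFamilyLine pp pend], pvPrefixOf r, [r]) := by
        simp [pvStep, hg]
      rw [hstep, ih _ _ _ (Or.inl (by simp)), pvRuns, if_pos hg]
      simp
    · have hstep : pvStep (ls, pp, pend) r = (ls, pvPrefixOf r, pend ++ [r]) := by
        simp only [pvStep]
        rw [if_neg hg]
      rw [hstep, ih _ _ _ (Or.inl (by simp)), pvRuns, if_neg hg]

theorem runs_eq (S : List String) (pp : String) (pend : List String)
    (hall : ∀ x ∈ pend, pvPrefixOf x = pp)
    (hchain : ((pend ++ S).map pvPrefixOf).Pairwise (· ≤ ·)) :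
    pvRuns pp pend S = (PySem.List.dedup ((pend ++ S).map pvPrefixOf)).map
      (fun p => (p, (pend ++ S).filter (fun x => pvPrefixOf x == p))) := by
  induction S generalizing pp pend with
  | nil =>
    simp only [List.append_nil]
    cases pend with
    | nil => simp [pvRuns, PySem.List.dedup, PySem.Set.ofList]
    | cons y ys =>
      have hded : PySem.List.dedup ((y :: ys).map pvPrefixOf) = [pp] := by
        have := dedup_const_append ((y :: ys).map pvPrefixOf) ([] : List String) pp
          (by intro x hx; rcases List.mem_map.mp hx with ⟨z, hz, rfl⟩; exact hall z hz)
          (by simp) (by simp)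
        rw [List.append_nil] at this
        rw [this]
        rfl
      have hfil : (y :: ys).filter (fun x => pvPrefixOf x == pp) = y :: ys :=
        List.filter_eq_self.mpr (fun a ha => by simpa [beq_iff_eq] using hall a ha)
      rw [hded, List.map_cons, List.map_nil, hfil]
      rfl
  | cons r t ih =>
    have hchain2 : (pend.map pvPrefixOf ++ (r :: t).map pvPrefixOf).Pairwise (· ≤ ·) := by
      rw [← List.map_append]; exact hchain
    have hchainRT : ((r :: t).map pvPrefixOf).Pairwise (· ≤ ·) :=
      (List.pairwise_append.mp hchain2).2.1
    by_cases hg : pend ≠ [] ∧ pvPrefixOf r ≠ pp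
    · obtain ⟨hpne, hrpp⟩ := hg
      have hlt : ∀ z ∈ (r :: t).map pvPrefixOf, pp < z := by
        obtain ⟨y, ys, rfl⟩ := List.exists_cons_of_ne_nil hpne
        have hy : pvPrefixOf y = pp := hall y (by simp)
        have hcross : ∀ z ∈ (r :: t).map pvPrefixOf, pp ≤ z := by
          intro z hz
          have h := (List.pairwise_append.mp hchain2).2.2 (pvPrefixOf y)
            (List.mem_map_of_mem (by simp)) z hz
          rwa [hy] at h
        intro z hz
        simp only [List.map_cons, List.mem_cons] at hz
        rcases hz with rfl | hz
        · exact lt_of_le_of_ne (hcross _ (by simp)) (Ne.symm hrpp)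
        · have h1 : pp < pvPrefixOf r :=
            lt_of_le_of_ne (hcross _ (by simp)) (Ne.symm hrpp)
          have h2 : pvPrefixOf r ≤ z :=
            (List.pairwise_cons.mp hchainRT).1 z hz
          exact lt_of_lt_of_le h1 h2
      have hnotmem : pp ∉ (r :: t).map pvPrefixOf := fun h => absurd (hlt pp h) (lt_irrefl pp)
      have ihr := ih (pvPrefixOf r) [r] (by simp)
        (by rw [List.singleton_append]; exact hchainRT)
      rw [List.singleton_append] at ihr
      rw [pvRuns, if_pos ⟨hpne, hrpp⟩, ihr]
      have hded : PySem.List.dedup ((pend ++ r :: t).map pvPrefixOf) =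
          pp :: PySem.List.dedup ((r :: t).map pvPrefixOf) := by
        rw [List.map_append]
        exact dedup_const_append _ _ _
          (by intro x hx; rcases List.mem_map.mp hx with ⟨z, hz, rfl⟩; exact hall z hz)
          (by simpa using hpne) hnotmem
      rw [hded, List.map_cons]
      congr 1
      · have h1 : pend.filter (fun x => pvPrefixOf x == pp) = pend :=
          List.filter_eq_self.mpr (fun a ha => by simpa [beq_iff_eq] using hall a ha)
        have h2 : (r :: t).filter (fun x => pvPrefixOf x == pp) = [] := by
          apply List.filter_eq_nil_iff.mpr
          intro a ha
          have hlt' : pp < pvPrefixOf a := hlt _ (List.mem_map_of_mem ha)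
          simp only [beq_iff_eq]
          exact fun h => absurd (h ▸ hlt') (lt_irrefl _)
        simp only [List.filter_append, h1, h2, List.append_nil]
      · apply List.map_congr_left
        intro p hp
        have hpmem : p ∈ (r :: t).map pvPrefixOf :=
          (dedup_sublist ((r :: t).map pvPrefixOf)).mem hp
        have hppne : p ≠ pp := fun h => absurd (h ▸ hlt p hpmem) (lt_irrefl _)
        have h3 : pend.filter (fun x => pvPrefixOf x == p) = [] := by
          apply List.filter_eq_nil_iff.mpr
          intro a ha
          simp only [beq_iff_eq, hall a ha]
          exact fun h => hppne h.symm
        simp only [List.filter_append, h3, List.nil_append]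
    · rw [pvRuns, if_neg hg]
      have hcase : pend = [] ∨ pvPrefixOf r = pp := by
        by_cases h1 : pend = []
        · exact Or.inl h1
        · right; by_contra h2; exact hg ⟨h1, h2⟩
      have hall' : ∀ x ∈ pend ++ [r], pvPrefixOf x = pvPrefixOf r := by
        intro x hx
        rcases List.mem_append.mp hx with hx | hx
        · rcases hcase with h | h
          · subst h; simp at hx
          · rw [hall x hx, h]
        · simp at hx; subst hx; rfl
      have hlist : (pend ++ [r]) ++ t = pend ++ r :: t := by simp
      have ihr := ih (pvPrefixOf r) (pend ++ [r]) hall' (by rw [hlist]; exact hchain)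
      rw [ihr, hlist]

-- the closed forms of the two ports, used only to assemble the final proof
theorem portA_closed (rows : List (List (String × String))) :
    build_section_lines rows =
      (if ((rows.filter (fun r => pvRowStatus r == "unmapped" && !(pvRowId r == ""))).map pvRowId) = [] then
        [pvHeader, "", pvNoGap, ""]
      else
        [pvHeader, ""] ++
          (PySem.List.sorted (PySem.List.dedup ((((rows.filter (fun r => pvRowStatus r == "unmapped" && !(pvRowId r == ""))).map pvRowId)).map pvPrefixOf)) (fun k => k)).map
            (fun p => pvFamilyLine p (PySem.List.sorted2
              ((((rows.filter (fun r => pvRowStatus r == "unmapped" && !(pvRowId r == ""))).map pvRowId)).filter (fun x => pvPrefixOf x == p))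
              pvPrefixOf pvSuffixKey)) ++ [""]) := by
  have hgrouped : (rows.foldl (fun d row =>
      if pvRowStatus row ≠ "unmapped" ∨ pvRowId row = "" then d
      else d.modify (pvPrefixOf (pvRowId row)) [] (fun g => g ++ [pvRowId row]))
      (PySem.Dict.empty : PySem.Dict String (List String)))
      = ((rows.filter (fun r => pvRowStatus r == "unmapped" && !(pvRowId r == ""))).map pvRowId).foldl
          (fun d x => d.modify (pvPrefixOf x) [] (fun g => g ++ [x])) PySem.Dict.empty := by
    have h1 : (fun (d : PySem.Dict String (List String)) row =>
        if pvRowStatus row ≠ "unmapped" ∨ pvRowId row = "" then d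
        else d.modify (pvPrefixOf (pvRowId row)) [] (fun g => g ++ [pvRowId row]))
        = (fun d row => if pvRowStatus row = "unmapped" ∧ pvRowId row ≠ "" then
            d.modify (pvPrefixOf (pvRowId row)) [] (fun g => g ++ [pvRowId row]) else d) := by
      funext d row
      by_cases h : pvRowStatus row = "unmapped" ∧ pvRowId row ≠ ""
      · rw [if_pos h, if_neg (by tauto)]
      · rw [if_pos (by tauto), if_neg h]
    rw [h1, PySem.List.foldl_ite_eq_foldl_filter
      (p := fun row => pvRowStatus row = "unmapped" ∧ pvRowId row ≠ "")]
    rw [List.foldl_map]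
    have h2 : rows.filter (fun row => decide (pvRowStatus row = "unmapped" ∧ pvRowId row ≠ "")) =
        rows.filter (fun r => pvRowStatus r == "unmapped" && !(pvRowId r == "")) :=
      List.filter_congr (fun r _ => by
        by_cases a : pvRowStatus r = "unmapped" <;> by_cases b : pvRowId r = "" <;> simp [a, b])
    rw [h2]
  unfold build_section_lines
  rw [hgrouped]
  dsimp only
  set L : List String :=
    (rows.filter (fun r => pvRowStatus r == "unmapped" && !(pvRowId r == ""))).map pvRowId with hL
  set G : PySem.Dict String (List String) :=
    L.foldl (fun d x => d.modify (pvPrefixOf x) [] (fun g => g ++ [x])) PySem.Dict.empty with hG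
  have hkeys : G.keys = PySem.List.dedup (L.map pvPrefixOf) := by
    rw [hG, PySem.Dict.keys_foldl_modify_key L pvPrefixOf [] (fun _ x => fun g => g ++ [x])]
    simp [PySem.Set.update, PySem.Set.ofList_eq_foldl]
  have hgetD : ∀ p, G.getD p [] = L.filter (fun x => pvPrefixOf x == p) := by
    intro p
    rw [hG, getD_group]
    rfl
  by_cases hnil : L = []
  · have hGe : G = PySem.Dict.empty := by rw [hG, hnil]; rfl
    rw [hGe, if_pos hnil]
    rfl
  · rw [if_neg hnil]
    have hkne : G.keys ≠ [] := by
      rcases List.exists_mem_of_ne_nil L hnil with ⟨x, hx⟩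
      rw [hkeys]
      exact List.ne_nil_of_mem (PySem.List.mem_dedup _ _ |>.mpr (List.mem_map_of_mem hx))
    have hitems : G.items ≠ [] := fun h => hkne (by simp [PySem.Dict.keys, h])
    have hine : G.items.isEmpty = false := by simpa [List.isEmpty_iff] using hitems
    rw [hine]
    simp only [Bool.false_eq_true, if_false]
    rw [PySem.List.foldl_append_singleton_eq_map
      (f := fun p => "- [x] Assimilate " ++ p ++ " requirement family into baseline contracts, policy hooks, and evidence tracking (`ROI: high`, `Type: engineering`, `Track: parity`, `Ref: " ++ PySem.Str.join ", " (PySem.List.sorted2 (G.getD p []) pvPrefixOf pvSuffixKey) ++ "`)")]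
    rw [hkeys]
    congr 1
    congr 1
    apply List.map_congr_left
    intro p _
    rw [hgetD]
    rfl

theorem portB_closed (rows : List (List (String × String))) :
    build_section_lines_alt rows =
      (if ((rows.filter (fun r => pvRowStatus r == "unmapped" && !(pvRowId r == ""))).map pvRowId) = [] then
        [pvHeader, "", pvNoGap, ""]
      else
        [pvHeader, ""] ++
          (PySem.List.dedup (((PySem.List.sorted (((rows.filter (fun r => pvRowStatus r == "unmapped" && !(pvRowId r == ""))).map pvRowId)) pvKey)).map pvPrefixOf)).map
            (fun p => pvFamilyLine p ((PySem.List.sorted (((rows.filter (fun r => pvRowStatus r == "unmapped" && !(pvRowId r == ""))).map pvRowId)) pvKey).filter (fun x => pvPrefixOf x == p))) ++ [""]) := by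
  unfold build_section_lines_alt
  dsimp only
  rw [sorted2_eq_sorted_pvKey]
  set L : List String :=
    (rows.filter (fun r => pvRowStatus r == "unmapped" && !(pvRowId r == ""))).map pvRowId with hL
  set S : List String := PySem.List.sorted L pvKey with hS
  by_cases hnil : L = []
  · have hS0 : S = [] := by rw [hS, hnil]; rfl
    rw [hS0, if_pos hnil]
    rfl
  · rw [if_neg hnil]
    have hSne : S ≠ [] := by
      rw [hS]
      intro h
      exact hnil ((PySem.List.sorted_eq_nil_iff L pvKey false).mp h)
    have hie : S.isEmpty = false := by simpa [List.isEmpty_iff] using hSne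
    rw [hie]
    simp only [Bool.false_eq_true, if_false]
    have hstep : (fun (s : List String × String × List String) (req_id : String) =>
        if s.2.2 ≠ [] ∧ pvPrefixOf req_id ≠ s.2.1 then
          (s.1 ++ [pvFamilyLine s.2.1 s.2.2], pvPrefixOf req_id, [req_id])
        else (s.1, pvPrefixOf req_id, s.2.2 ++ [req_id])) = pvStep := rfl
    rw [hstep]
    have hchainS : (S.map pvPrefixOf).Pairwise (· ≤ ·) := by
      rw [hS, List.pairwise_map]
      refine (PySem.List.sorted_pairwise L pvKey).imp ?_
      intro a b hab
      rw [pvKey, pvKey, Prod.Lex.toLex_le_toLex] at hab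
      rcases hab with h | ⟨h, _⟩
      · exact le_of_lt h
      · exact le_of_eq h
    rw [foldB_eq_runs S [pvHeader, ""] "" [] (Or.inr hSne),
      runs_eq S "" [] (by simp) (by simpa using hchainS)]
    simp [List.map_map, Function.comp]

-- ===== VERDICT (by name: the statement is the Claim_ definition above) =====
theorem build_section_lines_spec : Claim_equal_build_section_lines := by
  intro rows _ _
  show build_section_lines rows = build_section_lines_alt rows
  rw [portA_closed, portB_closed]
  set L : List String :=
    (rows.filter (fun r => pvRowStatus r == "unmapped" && !(pvRowId r == ""))).map pvRowId with hL
  by_cases hnil : L = []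
  · rw [if_pos hnil, if_pos hnil]
  · rw [if_neg hnil, if_neg hnil]
    set S : List String := PySem.List.sorted L pvKey with hS
    have hperm : (S.map pvPrefixOf).Perm (L.map pvPrefixOf) :=
      (PySem.List.sorted_perm L pvKey false).map pvPrefixOf
    have hchainS : (S.map pvPrefixOf).Pairwise (· ≤ ·) := by
      rw [List.pairwise_map]
      refine (PySem.List.sorted_pairwise L pvKey).imp ?_
      intro a b hab
      have := hab
      rw [pvKey, pvKey, Prod.Lex.toLex_le_toLex] at this
      rcases this with h | ⟨h, _⟩
      · exact le_of_lt h
      · exact le_of_eq h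
    have hded : PySem.List.sorted (PySem.List.dedup (L.map pvPrefixOf)) (fun k => k) =
        PySem.List.dedup (S.map pvPrefixOf) := by
      apply PySem.List.sorted_eq_of_perm_of_pairwise_lt
      · exact (List.perm_ext_iff_of_nodup (PySem.List.nodup_dedup _) (PySem.List.nodup_dedup _)).mpr
          (fun a => by
            rw [PySem.List.mem_dedup, PySem.List.mem_dedup]
            exact hperm.mem_iff)
      · have hle : (PySem.List.dedup (S.map pvPrefixOf)).Pairwise (· ≤ ·) :=
          List.Pairwise.sublist (dedup_sublist _) hchainS
        have hne : (PySem.List.dedup (S.map pvPrefixOf)).Pairwise (· ≠ ·) :=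
          PySem.List.nodup_dedup _
        exact (hle.and hne).imp (fun h => lt_of_le_of_ne h.1 h.2)
    rw [hded]
    congr 1
    congr 1
    apply List.map_congr_left
    intro p _
    congr 1
    rw [filter_sorted, sorted2_eq_sorted_pvKey]
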